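-- pv_equiv track=rewrite | github.com/MrBrantCode/unitest_baseline | mut_generate/mist_train_cf/cf_50407/solution.py | perfect_and_palindrome
-- ===== SOURCE A (Python) =====
-- def perfect_and_palindrome(n):
--     def is_perfect(num):
--         sum1 = 0
--         for i in range(1, num):
--             if(num % i == 0):
--                 sum1 = sum1 + i
--         return sum1 == num
--
--     def is_palindrome(num):
--         return str(num) == str(num)[::-1]
--
--     perfect_palindromes = []
--     for i in range(1, n+1):
--         if is_perfect(i) and is_palindrome(i):
--             perfect_palindromes.append(i)
--     return perfect_palindromes
-- ===== SOURCE B (Python) =====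
-- def perfect_and_palindrome(n):
--     if n <= 0:
--         return []
--     # sieve: scatter each d into all of its proper multiples up to n
--     divsum = [0] * (n + 1)
--     for d in range(1, n // 2 + 1):
--         for m in range(2 * d, n + 1, d):
--             divsum[m] += d
--     res = []
--     for i in range(1, n + 1):
--         s = str(i)
--         if divsum[i] == i and s == s[::-1]:
--             res.append(i)
--     return res
-- ===== Notes on version B (the rewrite author's own statement) =====
-- stated objective: faster
-- what changed: Replaces the per-number trial-division divisor sum (gather) with a single sieve that scatters each d into its multiples to precompute a proper-divisor-sum table, then one linear pass collects palindromic perfect numbers.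
import Mathlib
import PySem

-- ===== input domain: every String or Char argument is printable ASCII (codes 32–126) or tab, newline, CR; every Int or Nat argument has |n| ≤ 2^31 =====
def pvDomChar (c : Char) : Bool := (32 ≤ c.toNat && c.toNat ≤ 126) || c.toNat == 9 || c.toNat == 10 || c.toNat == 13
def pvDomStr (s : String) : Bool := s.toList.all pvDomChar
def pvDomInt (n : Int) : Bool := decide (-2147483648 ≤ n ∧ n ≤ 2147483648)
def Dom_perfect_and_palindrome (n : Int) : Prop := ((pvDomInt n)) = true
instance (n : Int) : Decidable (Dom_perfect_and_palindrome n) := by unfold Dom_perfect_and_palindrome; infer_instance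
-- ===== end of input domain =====

-- B replaces A's per-number trial-division divisor sum by a sieve that scatters each
-- divisor d into its multiples once, precomputing a proper-divisor-sum table (faster).

-- ===== PORT A =====
-- helper: A's nested 'is_perfect' — trial-division sum of proper divisors, compared with num
def pvIsPerfect (num : Int) : Bool :=
  ((PySem.List.pyRange 1 num 1).foldl
    (fun sum1 i => if PySem.Int.mod num i == 0 then sum1 + i else sum1) 0) == num

-- helper: A's nested 'is_palindrome' — str(num) == str(num)[::-1]
-- (step -1 never raises, so the .getD "" default is unreachable)
def pvIsPalindrome (num : Int) : Bool :=
  PySem.Int.toStr num == (PySem.Str.slice? (PySem.Int.toStr num) none none (-1)).getD ""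

def perfect_and_palindrome (n : Int) : List Int :=
  (PySem.List.pyRange 1 (n + 1) 1).foldl
    (fun perfect_palindromes i =>
      if pvIsPerfect i && pvIsPalindrome i then perfect_palindromes ++ [i]
      else perfect_palindromes) []

-- ===== PORT B =====
-- helper: B's inner sieve loop — 'for m in range(2*d, n+1, d): divsum[m] += d'
-- (every m here is in range 0 ≤ m ≤ n < len(divsum), so pySetD/pyGetD are exact)
def pvInner (n d : Int) (divsum : List Int) : List Int :=
  (PySem.List.pyRange (2 * d) (n + 1) d).foldl
    (fun ds m => PySem.List.pySetD ds m (PySem.List.pyGetD ds m 0 + d)) divsum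

-- helper: B's sieve — divsum = [0]*(n+1); for d in range(1, n//2+1): inner loop
def pvSieve (n : Int) : List Int :=
  (PySem.List.pyRange 1 (PySem.Int.floordiv n 2 + 1) 1).foldl
    (fun ds d => pvInner n d ds) (PySem.List.pyRepeat [(0 : Int)] (n + 1))

def perfect_and_palindrome_alt (n : Int) : List Int :=
  if n ≤ 0 then []
  else
    let divsum := pvSieve n
    (PySem.List.pyRange 1 (n + 1) 1).foldl
      (fun res i =>
        let s := PySem.Int.toStr i
        if (PySem.List.pyGetD divsum i 0 == i) &&
           (s == (PySem.Str.slice? s none none (-1)).getD "") then res ++ [i]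
        else res) []

-- ===== PRECONDITION & SPEC =====
def Spec_perfect_and_palindrome (n : Int) (out : List Int) : Prop := out = perfect_and_palindrome_alt n
instance (n : Int) (out : List Int) : Decidable (Spec_perfect_and_palindrome n out) := by unfold Spec_perfect_and_palindrome; infer_instance

-- ===== CLAIM (what is proved, stated in full; the proofs are below) =====
def Claim_equal_perfect_and_palindrome : Prop := ∀ (n : Int), Dom_perfect_and_palindrome n → Spec_perfect_and_palindrome n (perfect_and_palindrome n)

-- ===== LEMMAS AND PROOFS =====

-- the contribution of a candidate divisor d to the proper-divisor sum of i
def pvCommon (i d : Int) : Int := if d ∣ i ∧ d < i then d else 0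

theorem pvCommon_zero_of_ge {i d : Int} (h : i ≤ d) : pvCommon i d = 0 := by
  unfold pvCommon
  split_ifs with hc
  · omega
  · rfl

-- the list of multiples range(2*d, n+1, d) has no duplicates (d > 0)
theorem nodup_pyRange_step {a b d : Int} (hd : 0 < d) :
    (PySem.List.pyRange a b d).Nodup := by
  rw [PySem.List.pyRange_of_pos a b hd]
  refine List.Nodup.map ?_ (List.nodup_range)
  intro x y hxy
  have h1 : d * (x : Int) = d * y := by linarith
  have h2 : (x : Int) = y := mul_left_cancel₀ (by omega) h1
  exact_mod_cast h2

-- list assignment then read, with both indices nonnegative and the written one in range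
theorem pyGetD_pySetD_int {xs : List Int} {m i : Int} (v d : Int)
    (hm0 : 0 ≤ m) (hmlen : m < (xs.length : Int)) (hi : 0 ≤ i) :
    PySem.List.pyGetD (PySem.List.pySetD xs m v) i d
      = if i = m then v else PySem.List.pyGetD xs i d := by
  have h := PySem.List.pyGetD_pySetD_natCast xs m.toNat i.toNat v d (by omega)
  rw [Int.toNat_of_nonneg hm0, Int.toNat_of_nonneg hi] at h
  rw [h]
  by_cases hc : i = m
  · rw [if_pos hc, if_pos (by omega)]
  · rw [if_neg (by omega), if_neg hc]

-- effect of the inner sieve fold on one cell: adds d per occurrence of the index in the list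
theorem foldl_pySetD_getD (d : Int) (L : List Int) (ds : List Int)
    (hL : ∀ m ∈ L, 0 ≤ m ∧ m < (ds.length : Int)) (i : Int) (hi : 0 ≤ i) :
    PySem.List.pyGetD
      (L.foldl (fun ds m => PySem.List.pySetD ds m (PySem.List.pyGetD ds m 0 + d)) ds) i 0
      = PySem.List.pyGetD ds i 0 + d * (L.count i : Int) := by
  induction L generalizing ds with
  | nil => simp
  | cons m t ih =>
    have hm := hL m (by simp)
    simp only [List.foldl_cons]
    rw [ih _ (by
      intro x hx
      have := hL x (by simp [hx])
      simpa [PySem.List.length_pySetD] using this)]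
    rw [pyGetD_pySetD_int _ 0 hm.1 hm.2 hi, List.count_cons]
    by_cases hc : i = m
    · subst hc
      simp only [beq_self_eq_true, if_true]
      push_cast
      ring
    · have hb : (m == i) = false := by
        simp only [beq_eq_false_iff_ne, ne_eq]
        omega
      rw [if_neg hc, hb]
      simp

-- length is preserved through the inner fold
theorem length_foldl_pySetD (d : Int) (L : List Int) (ds : List Int) :
    (L.foldl (fun ds m => PySem.List.pySetD ds m (PySem.List.pyGetD ds m 0 + d)) ds).length
      = ds.length := by
  induction L generalizing ds with
  | nil => rfl
  | cons m t ih => simp [ih, PySem.List.length_pySetD]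

theorem pvInner_length {n d : Int} (ds : List Int) :
    (pvInner n d ds).length = ds.length := length_foldl_pySetD _ _ _

-- one inner pass adds the pvCommon contribution of d to cell i (1 ≤ i ≤ n)
theorem pvInner_getD {n d : Int} (hd : 1 ≤ d) (ds : List Int)
    (hlen : (ds.length : Int) = n + 1) {i : Int} (hi : 1 ≤ i) (hin : i ≤ n) :
    PySem.List.pyGetD (pvInner n d ds) i 0
      = PySem.List.pyGetD ds i 0 + pvCommon i d := by
  unfold pvInner
  rw [foldl_pySetD_getD d _ ds (by
    intro m hm
    rw [PySem.List.mem_pyRange_iff_of_pos (by omega)] at hm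
    omega) i (by omega)]
  congr 1
  by_cases h : i ∈ PySem.List.pyRange (2 * d) (n + 1) d
  · rw [List.count_eq_one_of_mem (nodup_pyRange_step (by omega)) h]
    rw [PySem.List.mem_pyRange_iff_of_pos (by omega)] at h
    obtain ⟨h1, h2, k, hk⟩ := h
    have hdvd : d ∣ i := ⟨k + 2, by linarith [show d * (k + 2) = d * k + 2 * d from by ring]⟩
    have hc : pvCommon i d = d := by
      unfold pvCommon
      rw [if_pos (show d ∣ i ∧ d < i from ⟨hdvd, by omega⟩)]
    omega
  · rw [List.count_eq_zero_of_not_mem h]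
    rw [PySem.List.mem_pyRange_iff_of_pos (by omega)] at h
    push Not at h
    have hc : pvCommon i d = 0 := by
      unfold pvCommon
      rw [if_neg]
      rintro ⟨hdvd, hlt⟩
      obtain ⟨k, hk⟩ := hdvd
      have hk2 : 2 ≤ k := by
        by_contra hcon
        have hk1 : k ≤ 1 := by omega
        have hmul : d * k ≤ d * 1 := mul_le_mul_of_nonneg_left hk1 (by omega)
        simp only [mul_one] at hmul
        linarith
      have h2d : 2 * d ≤ i := by
        have h0 : 0 ≤ d * (k - 2) := mul_nonneg (by omega) (by omega)
        have h1 : d * (k - 2) = d * k - 2 * d := by ring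
        linarith
      exact absurd ⟨k - 2, by linarith [show d * (k - 2) = d * k - 2 * d from by ring]⟩
        (h h2d (by omega))
    omega

-- the sieve cell i is the sum of pvCommon i d over the outer list of divisor candidates
theorem sieve_fold_getD {n : Int} (D : List Int) (hD : ∀ d ∈ D, 1 ≤ d)
    (ds : List Int) (hlen : (ds.length : Int) = n + 1)
    {i : Int} (hi : 1 ≤ i) (hin : i ≤ n) :
    PySem.List.pyGetD (D.foldl (fun ds d => pvInner n d ds) ds) i 0
      = PySem.List.pyGetD ds i 0 + (D.map (pvCommon i)).sum := by
  induction D generalizing ds with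
  | nil => simp
  | cons d t ih =>
    simp only [List.foldl_cons, List.map_cons, List.sum_cons]
    rw [ih (fun x hx => hD x (by simp [hx])) _
      (by rw [pvInner_length]; exact hlen)]
    rw [pvInner_getD (hD d (by simp)) ds hlen hi hin]
    ring

-- A's trial-division loop equals the mapped sum of pvCommon over range(1, i)
theorem trial_sum_eq {i : Int} :
    (PySem.List.pyRange 1 i 1).foldl
      (fun sum1 j => if PySem.Int.mod i j == 0 then sum1 + j else sum1) 0
      = ((PySem.List.pyRange 1 i 1).map (pvCommon i)).sum := by
  rw [PySem.List.foldl_congr_mem _ _ (fun sum1 j => sum1 + pvCommon i j) 0 (by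
    intro acc x hx
    rw [PySem.List.mem_pyRange_one] at hx
    by_cases h : x ∣ i
    · have hb : (PySem.Int.mod i x == 0) = true := by
        simpa [beq_iff_eq, PySem.Int.mod_eq_zero_iff_dvd] using h
      simp [hb, pvCommon, h, hx.2]
    · have hb : (PySem.Int.mod i x == 0) = false := by
        simpa [beq_iff_eq, PySem.Int.mod_eq_zero_iff_dvd] using h
      simp [hb, pvCommon, h])]
  rw [PySem.List.foldl_add]
  simp

-- sums of pvCommon over range(1, i) and range(1, n//2 + 1) agree for 1 ≤ i ≤ n
theorem sum_common_ranges {n i : Int} (hi : 1 ≤ i) (hin : i ≤ n) :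
    ((PySem.List.pyRange 1 (PySem.Int.floordiv n 2 + 1) 1).map (pvCommon i)).sum
      = ((PySem.List.pyRange 1 i 1).map (pvCommon i)).sum := by
  set q : Int := PySem.Int.floordiv n 2 with hq
  have hq2 : 2 * q ≤ n ∧ n < 2 * q + 2 := by
    rw [hq, PySem.Int.floordiv_eq_ediv_of_pos (by omega)]
    omega
  have hzero : ∀ d, q + 1 ≤ d → pvCommon i d = 0 := by
    intro d hd
    unfold pvCommon
    rw [if_neg]
    rintro ⟨hdvd, hlt⟩
    obtain ⟨k, hk⟩ := hdvd
    have hk2 : 2 ≤ k := by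
      by_contra hcon
      have hk1 : k ≤ 1 := by omega
      have hmul : d * k ≤ d * 1 := mul_le_mul_of_nonneg_left hk1 (by omega)
      simp only [mul_one] at hmul
      linarith
    have h0 : 0 ≤ d * (k - 2) := mul_nonneg (by omega) (by omega)
    have h1 : d * (k - 2) = d * k - 2 * d := by ring
    linarith
  have hzero' : ∀ d, i ≤ d → pvCommon i d = 0 := fun d hd => pvCommon_zero_of_ge hd
  have key : ∀ a b : Int, a ≤ b → (∀ d, a ≤ d → pvCommon i d = 0) →
      ((PySem.List.pyRange 1 b 1).map (pvCommon i)).sum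
        = ((PySem.List.pyRange 1 a 1).map (pvCommon i)).sum := by
    intro a b hab hz
    have hz' : ∀ (xs : List Int), (∀ x ∈ xs, a ≤ x) →
        ((xs.map (pvCommon i)).sum : Int) = 0 := by
      intro xs hxs
      apply List.sum_eq_zero
      intro x hx
      simp only [List.mem_map] at hx
      obtain ⟨d, hd, rfl⟩ := hx
      exact hz d (hxs d hd)
    by_cases ha : 1 ≤ a
    · rw [PySem.List.pyRange_one_append 1 a b ha hab, List.map_append, List.sum_append]
      have h2 : ((PySem.List.pyRange a b 1).map (pvCommon i)).sum = 0 := by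
        apply hz'
        intro x hx
        rw [PySem.List.mem_pyRange_one] at hx
        exact hx.1
      rw [h2, add_zero]
    · rw [PySem.List.pyRange_one_eq_nil (show a ≤ 1 by omega)]
      simp only [List.map_nil, List.sum_nil]
      apply hz'
      intro x hx
      rw [PySem.List.mem_pyRange_one] at hx
      omega
  by_cases hcmp : i ≤ q + 1
  · exact key i (q + 1) hcmp hzero'
  · exact (key (q + 1) i (by omega) hzero).symm

-- divsum[i] equals A's trial-division proper-divisor sum, for 1 ≤ i ≤ n
theorem sieve_getD_eq {n i : Int} (hn : 1 ≤ n) (hi : 1 ≤ i) (hin : i ≤ n) :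
    PySem.List.pyGetD (pvSieve n) i 0
      = (PySem.List.pyRange 1 i 1).foldl
          (fun sum1 j => if PySem.Int.mod i j == 0 then sum1 + j else sum1) 0 := by
  unfold pvSieve
  rw [sieve_fold_getD _ (by
      intro d hd
      rw [PySem.List.mem_pyRange_one] at hd
      omega)
    _ (by
      rw [PySem.List.pyRepeat_singleton, List.length_replicate]
      omega) hi hin]
  rw [trial_sum_eq, sum_common_ranges hi hin]
  have hbase : PySem.List.pyGetD (PySem.List.pyRepeat [(0 : Int)] (n + 1)) i 0 = 0 := by
    rw [PySem.List.pyRepeat_singleton]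
    have hin' : i = ((i.toNat : Nat) : Int) := by omega
    rw [hin', PySem.List.pyGetD_natCast]
    have hlt : i.toNat < (n + 1).toNat := by omega
    simp [List.getD, hlt]
  rw [hbase]
  ring

-- ===== VERDICT (by name: the statement is the Claim_ definition above) =====
theorem perfect_and_palindrome_spec : Claim_equal_perfect_and_palindrome := by
  intro n _
  unfold Spec_perfect_and_palindrome perfect_and_palindrome perfect_and_palindrome_alt
  by_cases hn : n ≤ 0
  · rw [if_pos hn, PySem.List.pyRange_one_eq_nil (by omega)]
    rfl
  · rw [if_neg hn]
    apply PySem.List.foldl_congr_mem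
    intro acc i hi
    rw [PySem.List.mem_pyRange_one] at hi
    have hperf : pvIsPerfect i = (PySem.List.pyGetD (pvSieve n) i 0 == i) := by
      unfold pvIsPerfect
      rw [sieve_getD_eq (by omega) hi.1 (by omega)]
    rw [hperf]
    rfl
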